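-- pv_equiv track=rewrite | github.com/ahmedoo18/Sports-Ball-Table-Assignment | Assign Tables v3.py | is_contiguous
-- ===== SOURCE A (Python) =====
-- from collections import deque, defaultdict
--
-- def is_contiguous(poses):
--     if not poses: return True
--     seen = {poses[0]}
--     queue = deque([poses[0]])
--     pose_set = set(poses)
--     while queue:
--         node = queue.popleft()
--         for dr, dc in [(-1,0), (1,0), (0,-1), (0,1)]:
--             neighbor = (node[0]+dr, node[1]+dc)
--             if neighbor in pose_set and neighbor not in seen:
--                 seen.add(neighbor)
--                 queue.append(neighbor)
--     return len(seen) == len(poses)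
-- ===== SOURCE B (Python) =====
-- def is_contiguous(poses):
--     if not poses:
--         return True
--     reached = {poses[0]}
--     changed = True
--     while changed:
--         changed = False
--         for cell in poses:
--             if cell not in reached:
--                 r, c = cell
--                 if (r - 1, c) in reached or (r + 1, c) in reached \
--                         or (r, c - 1) in reached or (r, c + 1) in reached:
--                     reached.add(cell)
--                     changed = True
--     return len(reached) == len(poses)
-- ===== Notes on version B (the rewrite author's own statement) =====
-- stated objective: alternative
-- what changed: Replaces the deque-based BFS over a prebuilt position set by repeated relaxation sweeps over the input list that absorb any cell adjacent to the reached region until a fixpoint; no queue and no auxiliary set are built.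
import Mathlib
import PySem

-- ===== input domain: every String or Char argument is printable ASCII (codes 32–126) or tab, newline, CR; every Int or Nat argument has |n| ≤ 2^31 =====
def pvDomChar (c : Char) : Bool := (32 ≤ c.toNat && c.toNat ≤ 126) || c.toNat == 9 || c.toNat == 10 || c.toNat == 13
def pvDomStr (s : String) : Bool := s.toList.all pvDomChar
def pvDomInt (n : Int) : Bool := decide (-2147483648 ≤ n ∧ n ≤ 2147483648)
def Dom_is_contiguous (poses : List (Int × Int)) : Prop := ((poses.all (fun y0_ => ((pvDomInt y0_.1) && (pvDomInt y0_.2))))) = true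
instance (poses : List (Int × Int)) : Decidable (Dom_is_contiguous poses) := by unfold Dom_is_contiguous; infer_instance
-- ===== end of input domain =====

-- B replaces A's deque-based BFS by repeated relaxation sweeps over the input list until a
-- fixpoint (alternative algorithm, no queue and no auxiliary set; not claimed faster).

-- ===== PORT A =====
-- the list of 4 neighbour offsets from A's inner for-loop
def isContigDirs : List (Int × Int) := [(-1,0), (1,0), (0,-1), (0,1)]

-- body of A's inner 'for dr, dc in …' loop: state = (seen, queue)
def isContigStep (cells : List (Int × Int)) (node : Int × Int)
    (st : List (Int × Int) × List (Int × Int)) (d : Int × Int) :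
    List (Int × Int) × List (Int × Int) :=
  if (node.1 + d.1, node.2 + d.2) ∈ cells ∧ (node.1 + d.1, node.2 + d.2) ∉ st.1
  then (st.1 ++ [(node.1 + d.1, node.2 + d.2)], st.2 ++ [(node.1 + d.1, node.2 + d.2)]) else st

def isContigInner (cells : List (Int × Int)) (node : Int × Int)
    (st : List (Int × Int) × List (Int × Int)) : List (Int × Int) × List (Int × Int) :=
  isContigDirs.foldl (isContigStep cells node) st

-- termination helper: adding a fresh cell of `cells` to `seen` shrinks the unseen part
theorem pvFilterAppendLt (cells seen : List (Int × Int)) (nb : Int × Int)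
    (h1 : nb ∈ cells) (h2 : nb ∉ seen) :
    (cells.filter (fun c => decide (c ∉ seen ++ [nb]))).length <
      (cells.filter (fun c => decide (c ∉ seen))).length := by
  have hcong : cells.filter (fun c => decide (c ∉ seen ++ [nb]))
      = (cells.filter (fun c => decide (c ∉ seen))).filter (fun c => decide (c ≠ nb)) := by
    rw [List.filter_filter]
    apply List.filter_congr
    intro x _
    by_cases hx1 : x ∈ seen <;> by_cases hx2 : x = nb <;> simp [hx1, hx2]
  rw [hcong]
  apply List.length_filter_lt_length_iff_exists.mpr
  exact ⟨nb, by simp [h1, h2], by simp⟩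

theorem isContigFold_measure (cells : List (Int × Int)) (node : Int × Int) :
    ∀ (ds : List (Int × Int)) (st : List (Int × Int) × List (Int × Int)),
      (cells.filter (fun c => decide (c ∉ (ds.foldl (isContigStep cells node) st).1))).length
        + (ds.foldl (isContigStep cells node) st).2.length
      ≤ (cells.filter (fun c => decide (c ∉ st.1))).length + st.2.length := by
  intro ds
  induction ds with
  | nil => intro st; simp
  | cons d ds ih =>
    intro st
    simp only [List.foldl_cons]
    refine le_trans (ih _) ?_
    unfold isContigStep
    split
    · rename_i h
      have := pvFilterAppendLt cells st.1 (node.1 + d.1, node.2 + d.2) h.1 h.2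
      simp only [List.length_append, List.length_cons, List.length_nil]
      omega
    · exact le_refl _

def isContigBFS (cells : List (Int × Int)) :
    List (Int × Int) → List (Int × Int) → List (Int × Int)
  | seen, [] => seen
  | seen, node :: rest =>
      isContigBFS cells (isContigInner cells node (seen, rest)).1
        (isContigInner cells node (seen, rest)).2
  termination_by seen queue => (cells.filter (fun c => decide (c ∉ seen))).length + queue.length
  decreasing_by
    have h := isContigFold_measure cells node isContigDirs (seen, rest)
    simp only [isContigInner, List.length_cons]
    simp only at h
    exact lt_of_le_of_lt h (by omega)

def is_contiguous (poses : List (Int × Int)) : Bool :=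
  match poses with
  | [] => true
  | p0 :: _ =>
      let pose_set : PySem.Set (Int × Int) := PySem.Set.ofList poses
      let seen := isContigBFS pose_set [p0] [p0]
      decide (seen.length = poses.length)

-- ===== PORT B =====
-- body of B's inner 'for cell in poses' sweep: state = (reached, changed)
def satStep (st : List (Int × Int) × Bool) (cell : Int × Int) : List (Int × Int) × Bool :=
  if cell ∉ st.1 ∧ ((cell.1 - 1, cell.2) ∈ st.1 ∨ (cell.1 + 1, cell.2) ∈ st.1 ∨
      (cell.1, cell.2 - 1) ∈ st.1 ∨ (cell.1, cell.2 + 1) ∈ st.1)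
  then (st.1 ++ [cell], true) else st

-- termination helpers for the while-loop: the flag only ever turns on, and a pass that
-- reports a change strictly shrinks the unreached part
theorem satFold_both (cells : List (Int × Int)) :
    ∀ (l : List (Int × Int)), (∀ x ∈ l, x ∈ cells) →
    ∀ st : List (Int × Int) × Bool,
      (cells.filter (fun c => decide (c ∉ (l.foldl satStep st).1))).length ≤
        (cells.filter (fun c => decide (c ∉ st.1))).length ∧
      ((l.foldl satStep st).2 = true → st.2 = true ∨
        (cells.filter (fun c => decide (c ∉ (l.foldl satStep st).1))).length <
          (cells.filter (fun c => decide (c ∉ st.1))).length) := by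
  intro l
  induction l with
  | nil => intro _ st; exact ⟨le_refl _, fun h => Or.inl h⟩
  | cons c l ih =>
    intro hsub st
    have hsub' : ∀ x ∈ l, x ∈ cells := fun x hx => hsub x (List.mem_cons_of_mem _ hx)
    simp only [List.foldl_cons]
    by_cases hc : c ∉ st.1 ∧ ((c.1 - 1, c.2) ∈ st.1 ∨ (c.1 + 1, c.2) ∈ st.1 ∨
        (c.1, c.2 - 1) ∈ st.1 ∨ (c.1, c.2 + 1) ∈ st.1)
    · have hstep : satStep st c = (st.1 ++ [c], true) := by simp [satStep, hc]
      simp only [hstep]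
      have hlt := pvFilterAppendLt cells st.1 c (hsub c (List.mem_cons_self ..)) hc.1
      have h1 := ih hsub' (st.1 ++ [c], true)
      exact ⟨le_trans h1.1 (le_of_lt hlt), fun _ => Or.inr (lt_of_le_of_lt h1.1 hlt)⟩
    · have hstep : satStep st c = st := by simp only [satStep, if_neg hc]
      simp only [hstep]
      exact ih hsub' st

theorem satFold_measure_lt (l : List (Int × Int)) (r : List (Int × Int))
    (h : (l.foldl satStep (r, false)).2 = true) :
    (l.filter (fun c => decide (c ∉ (l.foldl satStep (r, false)).1))).length <
      (l.filter (fun c => decide (c ∉ r))).length := by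
  have := satFold_both l l (fun x hx => hx) (r, false)
  rcases this.2 h with h' | h'
  · exact absurd h' (by simp)
  · exact h'

def satLoop (poses : List (Int × Int)) (reached : List (Int × Int)) : List (Int × Int) :=
  if h : (poses.foldl satStep (reached, false)).2 = true then
    satLoop poses (poses.foldl satStep (reached, false)).1
  else (poses.foldl satStep (reached, false)).1
  termination_by (poses.filter (fun c => decide (c ∉ reached))).length
  decreasing_by
    simp only [List.foldl_attach]
    exact satFold_measure_lt poses reached h

def is_contiguous_alt (poses : List (Int × Int)) : Bool :=
  match poses with
  | [] => true
  | p0 :: _ => decide ((satLoop poses [p0]).length = poses.length)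

-- ===== PRECONDITION & SPEC =====
def Spec_is_contiguous (poses : List (Int × Int)) (out : Bool) : Prop := out = is_contiguous_alt poses
instance (poses : List (Int × Int)) (out : Bool) : Decidable (Spec_is_contiguous poses out) := by unfold Spec_is_contiguous; infer_instance

-- ===== CLAIM (what is proved, stated in full; the proofs are below) =====
def Claim_equal_is_contiguous : Prop := ∀ (poses : List (Int × Int)), Dom_is_contiguous poses → Spec_is_contiguous poses (is_contiguous poses)

-- ===== LEMMAS AND PROOFS =====

-- the sweep's changed-flag only ever turns on
theorem satFold_flag (l : List (Int × Int)) :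
    ∀ st : List (Int × Int) × Bool, st.2 = true → (l.foldl satStep st).2 = true := by
  induction l with
  | nil => intro st h; simpa using h
  | cons c l ih =>
    intro st h
    simp only [List.foldl_cons]
    apply ih
    unfold satStep
    split <;> simp [h]

-- adjacency in the 4-neighbour grid, and reachability inside a cell list
def pvAdj (u v : Int × Int) : Prop :=
  v = (u.1 - 1, u.2) ∨ v = (u.1 + 1, u.2) ∨ v = (u.1, u.2 - 1) ∨ v = (u.1, u.2 + 1)

inductive pvReach (cells : List (Int × Int)) (start : Int × Int) : Int × Int → Prop
  | base : pvReach cells start start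
  | step {u v : Int × Int} : pvReach cells start u → v ∈ cells → pvAdj u v → pvReach cells start v

theorem pvAdj_of_dir {u d : Int × Int} (hd : d ∈ isContigDirs) :
    pvAdj u (u.1 + d.1, u.2 + d.2) := by
  simp only [isContigDirs, List.mem_cons, List.not_mem_nil, or_false] at hd
  rcases hd with h | h | h | h <;> subst h <;> simp only [pvAdj, Prod.mk.injEq, Prod.ext_iff, add_zero, true_and, and_true, true_or, or_true] <;> try omega

theorem pvAdj_dir {u v : Int × Int} (h : pvAdj u v) :
    ∃ d ∈ isContigDirs, v = (u.1 + d.1, u.2 + d.2) := by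
  rcases h with h | h | h | h <;> subst h
  · exact ⟨(-1,0), by simp [isContigDirs], by simp only [Prod.mk.injEq, add_zero, true_and, and_true, true_or, or_true]; try omega⟩
  · exact ⟨(1,0), by simp [isContigDirs], by simp only [Prod.mk.injEq, add_zero, true_and, and_true, true_or, or_true]; try omega⟩
  · exact ⟨(0,-1), by simp [isContigDirs], by simp only [Prod.mk.injEq, add_zero, true_and, and_true, true_or, or_true]; try omega⟩
  · exact ⟨(0,1), by simp [isContigDirs], by simp only [Prod.mk.injEq, add_zero, true_and, and_true, true_or, or_true]; try omega⟩

theorem pvAdj_symm {u v : Int × Int} (h : pvAdj u v) : pvAdj v u := by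
  rcases h with h | h | h | h <;> subst h <;> simp only [pvAdj, Prod.mk.injEq, Prod.ext_iff, add_zero, true_and, and_true, true_or, or_true] <;> try omega

theorem pvReach_congr {l1 l2 : List (Int × Int)} (h : ∀ y, y ∈ l1 ↔ y ∈ l2)
    {s x : Int × Int} (hr : pvReach l1 s x) : pvReach l2 s x := by
  induction hr with
  | base => exact pvReach.base
  | step _ hv hadj ih => exact pvReach.step ih ((h _).mp hv) hadj

theorem pvNodupSnoc {α : Type} (l : List α) (a : α) (h : l.Nodup) (ha : a ∉ l) :
    (l ++ [a]).Nodup := by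
  rw [List.nodup_append]
  refine ⟨h, List.nodup_singleton _, ?_⟩
  intro x hx y hy
  have hya : y = a := by simpa using hy
  subst hya
  intro hxa
  subst hxa
  exact ha hx

-- one step of A's inner loop either does nothing or appends a fresh cell to seen and queue
theorem isContigStep_cases (cells : List (Int × Int)) (node : Int × Int)
    (st : List (Int × Int) × List (Int × Int)) (d : Int × Int) :
    (¬((node.1 + d.1, node.2 + d.2) ∈ cells ∧ (node.1 + d.1, node.2 + d.2) ∉ st.1) ∧
        isContigStep cells node st d = st) ∨
    ((node.1 + d.1, node.2 + d.2) ∈ cells ∧ (node.1 + d.1, node.2 + d.2) ∉ st.1 ∧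
        isContigStep cells node st d =
          (st.1 ++ [(node.1 + d.1, node.2 + d.2)], st.2 ++ [(node.1 + d.1, node.2 + d.2)])) := by
  unfold isContigStep
  split
  · rename_i h; exact Or.inr ⟨h.1, h.2, rfl⟩
  · rename_i h; exact Or.inl ⟨h, rfl⟩

-- everything A's inner for-loop does, in one induction
theorem innerFold_spec (cells : List (Int × Int)) (node : Int × Int) :
    ∀ (ds : List (Int × Int)) (st : List (Int × Int) × List (Int × Int)),
      (∀ x ∈ st.1, x ∈ (ds.foldl (isContigStep cells node) st).1) ∧
      (∀ x ∈ st.2, x ∈ (ds.foldl (isContigStep cells node) st).2) ∧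
      (∀ x ∈ (ds.foldl (isContigStep cells node) st).1,
        x ∈ st.1 ∨ (x ∈ cells ∧ ∃ d ∈ ds, x = (node.1 + d.1, node.2 + d.2))) ∧
      (∀ x ∈ (ds.foldl (isContigStep cells node) st).1,
        x ∈ st.1 ∨ x ∈ (ds.foldl (isContigStep cells node) st).2) ∧
      (∀ x ∈ (ds.foldl (isContigStep cells node) st).2,
        x ∈ st.2 ∨ x ∈ (ds.foldl (isContigStep cells node) st).1) ∧
      (∀ d ∈ ds, (node.1 + d.1, node.2 + d.2) ∈ cells →
        (node.1 + d.1, node.2 + d.2) ∈ (ds.foldl (isContigStep cells node) st).1) ∧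
      (st.1.Nodup → (ds.foldl (isContigStep cells node) st).1.Nodup) := by
  intro ds
  induction ds with
  | nil =>
    intro st
    refine ⟨fun x hx => hx, fun x hx => hx, fun x hx => Or.inl hx, fun x hx => Or.inl hx,
      fun x hx => Or.inl hx, ?_, fun h => h⟩
    intro d hd; simp at hd
  | cons d ds ih =>
    intro st
    simp only [List.foldl_cons]
    rcases isContigStep_cases cells node st d with ⟨hno, heq⟩ | ⟨hc, hns, heq⟩
    · rw [heq]
      obtain ⟨m1, m2, src, s2q, q2s, proc, nd⟩ := ih st
      refine ⟨m1, m2, ?_, s2q, q2s, ?_, nd⟩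
      · intro x hx
        rcases src x hx with h | ⟨h1, d', hd', h2⟩
        · exact Or.inl h
        · exact Or.inr ⟨h1, d', List.mem_cons_of_mem _ hd', h2⟩
      · intro d' hd' hcell
        rcases List.mem_cons.mp hd' with h | h
        · subst h
          have : (node.1 + d'.1, node.2 + d'.2) ∈ st.1 := by
            by_contra hcontra; exact hno ⟨hcell, hcontra⟩
          exact m1 _ this
        · exact proc d' h hcell
    · rw [heq]
      obtain ⟨m1, m2, src, s2q, q2s, proc, nd⟩ :=
        ih (st.1 ++ [(node.1 + d.1, node.2 + d.2)], st.2 ++ [(node.1 + d.1, node.2 + d.2)])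
      simp only at m1 m2 src s2q q2s proc nd
      refine ⟨fun x hx => m1 x (List.mem_append_left _ hx),
        fun x hx => m2 x (List.mem_append_left _ hx), ?_, ?_, ?_, ?_, ?_⟩
      · intro x hx
        rcases src x hx with h | ⟨h1, d', hd', h2⟩
        · rcases List.mem_append.mp h with h | h
          · exact Or.inl h
          · simp only [List.mem_singleton] at h
            exact Or.inr ⟨by rw [h]; exact hc, d, List.mem_cons_self .., h⟩
        · exact Or.inr ⟨h1, d', List.mem_cons_of_mem _ hd', h2⟩
      · intro x hx
        rcases s2q x hx with h | h
        · rcases List.mem_append.mp h with h | h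
          · exact Or.inl h
          · simp only [List.mem_singleton] at h
            exact Or.inr (m2 x (by rw [h]; exact List.mem_append_right _ (List.mem_singleton_self _)))
        · exact Or.inr h
      · intro x hx
        rcases q2s x hx with h | h
        · rcases List.mem_append.mp h with h | h
          · exact Or.inl h
          · simp only [List.mem_singleton] at h
            exact Or.inr (m1 x (by rw [h]; exact List.mem_append_right _ (List.mem_singleton_self _)))
        · exact Or.inr h
      · intro d' hd' hcell
        rcases List.mem_cons.mp hd' with h | h
        · subst h
          exact m1 _ (List.mem_append_right _ (List.mem_singleton_self _))
        · exact proc d' h hcell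
      · intro hnd
        exact nd (pvNodupSnoc _ _ hnd hns)

theorem bfs_mono (cells : List (Int × Int)) :
    ∀ (seen queue : List (Int × Int)), ∀ x ∈ seen, x ∈ isContigBFS cells seen queue := by
  intro seen queue
  induction seen, queue using isContigBFS.induct cells with
  | case1 seen => intro x hx; rw [isContigBFS]; exact hx
  | case2 seen node rest ih =>
    intro x hx
    rw [isContigBFS]
    exact ih x ((innerFold_spec cells node isContigDirs (seen, rest)).1 x hx)

theorem bfs_nodup (cells : List (Int × Int)) :
    ∀ (seen queue : List (Int × Int)), seen.Nodup → (isContigBFS cells seen queue).Nodup := by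
  intro seen queue
  induction seen, queue using isContigBFS.induct cells with
  | case1 seen => intro h; rw [isContigBFS]; exact h
  | case2 seen node rest ih =>
    intro h
    rw [isContigBFS]
    exact ih ((innerFold_spec cells node isContigDirs (seen, rest)).2.2.2.2.2.2 h)

theorem bfs_sound (cells : List (Int × Int)) (R : Int × Int → Prop)
    (hR : ∀ u v, R u → v ∈ cells → pvAdj u v → R v) :
    ∀ (seen queue : List (Int × Int)), (∀ s ∈ seen, R s) → (∀ q ∈ queue, R q) →
      ∀ x ∈ isContigBFS cells seen queue, R x := by
  intro seen queue
  induction seen, queue using isContigBFS.induct cells with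
  | case1 seen => intro h1 _ x hx; rw [isContigBFS] at hx; exact h1 x hx
  | case2 seen node rest ih =>
    intro h1 h2 x hx
    rw [isContigBFS] at hx
    obtain ⟨m1, m2, src, s2q, q2s, proc, nd⟩ := innerFold_spec cells node isContigDirs (seen, rest)
    have h1' : ∀ y ∈ (isContigInner cells node (seen, rest)).1, R y := by
      intro y hy
      rcases src y hy with h | ⟨hcells, d, hd, hform⟩
      · exact h1 y h
      · subst hform
        exact hR node _ (h2 node (List.mem_cons_self ..)) hcells (pvAdj_of_dir hd)
    have h2' : ∀ y ∈ (isContigInner cells node (seen, rest)).2, R y := by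
      intro y hy
      rcases q2s y hy with h | h
      · exact h2 y (List.mem_cons_of_mem _ h)
      · exact h1' y h
    exact ih h1' h2' x hx

theorem bfs_closed (cells : List (Int × Int)) :
    ∀ (seen queue : List (Int × Int)), (∀ q ∈ queue, q ∈ seen) →
      (∀ u ∈ seen, u ∈ queue ∨ ∀ v, v ∈ cells → pvAdj u v → v ∈ seen) →
      ∀ u ∈ isContigBFS cells seen queue, ∀ v, v ∈ cells → pvAdj u v →
        v ∈ isContigBFS cells seen queue := by
  intro seen queue
  induction seen, queue using isContigBFS.induct cells with
  | case1 seen =>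
    intro _ hcl u hu v hv hadj
    rw [isContigBFS] at hu ⊢
    rcases hcl u hu with h | h
    · simp at h
    · exact h v hv hadj
  | case2 seen node rest ih =>
    intro hq hcl
    obtain ⟨m1, m2, src, s2q, q2s, proc, nd⟩ := innerFold_spec cells node isContigDirs (seen, rest)
    have hq' : ∀ q ∈ (isContigInner cells node (seen, rest)).2,
        q ∈ (isContigInner cells node (seen, rest)).1 := by
      intro q hqm
      rcases q2s q hqm with h | h
      · exact m1 q (hq q (List.mem_cons_of_mem _ h))
      · exact h
    have hcl' : ∀ u ∈ (isContigInner cells node (seen, rest)).1,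
        u ∈ (isContigInner cells node (seen, rest)).2 ∨
          ∀ v, v ∈ cells → pvAdj u v → v ∈ (isContigInner cells node (seen, rest)).1 := by
      intro u hu
      rcases s2q u hu with h | h
      · rcases hcl u h with hm | hall
        · rcases List.mem_cons.mp hm with heq | hrest
          · subst heq
            refine Or.inr (fun v hv hadj => ?_)
            obtain ⟨d, hd, hform⟩ := pvAdj_dir hadj
            subst hform
            exact proc d hd hv
          · exact Or.inl (m2 u hrest)
        · exact Or.inr (fun v hv hadj => m1 v (hall v hv hadj))
      · exact Or.inl h
    intro u hu v hv hadj
    rw [isContigBFS] at hu ⊢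
    exact ih hq' hcl' u hu v hv hadj

theorem bfs_complete (cells : List (Int × Int)) (start : Int × Int) (x : Int × Int)
    (h : pvReach cells start x) : x ∈ isContigBFS cells [start] [start] := by
  induction h with
  | base => exact bfs_mono cells [start] [start] start (List.mem_singleton_self _)
  | step _ hv hadj ih =>
    exact bfs_closed cells [start] [start]
      (fun q hq => hq)
      (fun u hu => Or.inl hu)
      _ ih _ hv hadj

-- B-side fold lemmas
theorem satStep_cases (st : List (Int × Int) × Bool) (c : Int × Int) :
    (¬(c ∉ st.1 ∧ ((c.1 - 1, c.2) ∈ st.1 ∨ (c.1 + 1, c.2) ∈ st.1 ∨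
        (c.1, c.2 - 1) ∈ st.1 ∨ (c.1, c.2 + 1) ∈ st.1)) ∧ satStep st c = st) ∨
    ((c ∉ st.1 ∧ ((c.1 - 1, c.2) ∈ st.1 ∨ (c.1 + 1, c.2) ∈ st.1 ∨
        (c.1, c.2 - 1) ∈ st.1 ∨ (c.1, c.2 + 1) ∈ st.1)) ∧
      satStep st c = (st.1 ++ [c], true)) := by
  unfold satStep
  split
  · rename_i h; exact Or.inr ⟨h, rfl⟩
  · rename_i h; exact Or.inl ⟨h, rfl⟩

theorem satFold_mono (l : List (Int × Int)) :
    ∀ st : List (Int × Int) × Bool, ∀ x ∈ st.1, x ∈ (l.foldl satStep st).1 := by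
  induction l with
  | nil => intro st x hx; exact hx
  | cons c l ih =>
    intro st x hx
    simp only [List.foldl_cons]
    rcases satStep_cases st c with ⟨_, heq⟩ | ⟨_, heq⟩ <;> rw [heq]
    · exact ih st x hx
    · exact ih _ x (List.mem_append_left _ hx)

theorem satFold_nodup (l : List (Int × Int)) :
    ∀ st : List (Int × Int) × Bool, st.1.Nodup → (l.foldl satStep st).1.Nodup := by
  induction l with
  | nil => intro st h; exact h
  | cons c l ih =>
    intro st h
    simp only [List.foldl_cons]
    rcases satStep_cases st c with ⟨_, heq⟩ | ⟨⟨hns, _⟩, heq⟩ <;> rw [heq]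
    · exact ih st h
    · exact ih _ (pvNodupSnoc _ _ h hns)

theorem satFold_sound (poses : List (Int × Int)) (R : Int × Int → Prop)
    (hR : ∀ u v, R u → v ∈ poses → pvAdj u v → R v) :
    ∀ l : List (Int × Int), (∀ x ∈ l, x ∈ poses) →
      ∀ st : List (Int × Int) × Bool, (∀ x ∈ st.1, R x) →
      ∀ x ∈ (l.foldl satStep st).1, R x := by
  intro l
  induction l with
  | nil => intro _ st h x hx; exact h x hx
  | cons c l ih =>
    intro hsub st h x hx
    have hsub' : ∀ y ∈ l, y ∈ poses := fun y hy => hsub y (List.mem_cons_of_mem _ hy)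
    simp only [List.foldl_cons] at hx
    rcases satStep_cases st c with ⟨_, heq⟩ | ⟨⟨hns, hnb⟩, heq⟩ <;> rw [heq] at hx
    · exact ih hsub' st h x hx
    · refine ih hsub' _ ?_ x hx
      intro y hy
      rcases List.mem_append.mp hy with hyo | hyc
      · exact h y hyo
      · simp only [List.mem_singleton] at hyc
        rw [hyc]
        have hcp : c ∈ poses := hsub c (List.mem_cons_self ..)
        rcases hnb with hn | hn | hn | hn
        · exact hR _ c (h _ hn) hcp (by simp only [pvAdj, Prod.mk.injEq, Prod.ext_iff, add_zero, true_and, and_true, true_or, or_true]; try omega)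
        · exact hR _ c (h _ hn) hcp (by simp only [pvAdj, Prod.mk.injEq, Prod.ext_iff, add_zero, true_and, and_true, true_or, or_true]; try omega)
        · exact hR _ c (h _ hn) hcp (by simp only [pvAdj, Prod.mk.injEq, Prod.ext_iff, add_zero, true_and, and_true, true_or, or_true]; try omega)
        · exact hR _ c (h _ hn) hcp (by simp only [pvAdj, Prod.mk.injEq, Prod.ext_iff, add_zero, true_and, and_true, true_or, or_true]; try omega)

theorem satFold_fix (l : List (Int × Int)) :
    ∀ r : List (Int × Int), (l.foldl satStep (r, false)).2 = false →
      (l.foldl satStep (r, false)).1 = r ∧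
      ∀ c ∈ l, c ∉ r → ¬((c.1 - 1, c.2) ∈ r ∨ (c.1 + 1, c.2) ∈ r ∨
        (c.1, c.2 - 1) ∈ r ∨ (c.1, c.2 + 1) ∈ r) := by
  induction l with
  | nil => intro r _; exact ⟨rfl, by simp⟩
  | cons c l ih =>
    intro r hfalse
    simp only [List.foldl_cons] at hfalse ⊢
    rcases satStep_cases (r, false) c with ⟨hno, heq⟩ | ⟨_, heq⟩
    · rw [heq] at hfalse ⊢
      obtain ⟨h1, h2⟩ := ih r hfalse
      refine ⟨h1, ?_⟩
      intro c' hc' hnr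
      rcases List.mem_cons.mp hc' with h | h
      · subst h
        intro hcontra
        exact hno ⟨hnr, hcontra⟩
      · exact h2 c' h hnr
    · rw [heq] at hfalse
      have := satFold_flag l (r ++ [c], true) rfl
      rw [hfalse] at this
      exact absurd this (by simp)

theorem satLoop_mono (poses : List (Int × Int)) :
    ∀ reached : List (Int × Int), ∀ x ∈ reached, x ∈ satLoop poses reached := by
  intro reached
  induction reached using satLoop.induct poses with
  | case1 r hflag ih =>
    simp only [List.foldl_attach] at ih
    intro x hx
    rw [satLoop, dif_pos hflag]
    exact ih x (satFold_mono poses (r, false) x hx)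
  | case2 r hflag =>
    intro x hx
    rw [satLoop, dif_neg hflag]
    exact satFold_mono poses (r, false) x hx

theorem satLoop_nodup (poses : List (Int × Int)) :
    ∀ reached : List (Int × Int), reached.Nodup → (satLoop poses reached).Nodup := by
  intro reached
  induction reached using satLoop.induct poses with
  | case1 r hflag ih =>
    simp only [List.foldl_attach] at ih
    intro h
    rw [satLoop, dif_pos hflag]
    exact ih (satFold_nodup poses (r, false) h)
  | case2 r hflag =>
    intro h
    rw [satLoop, dif_neg hflag]
    exact satFold_nodup poses (r, false) h

theorem satLoop_sound (poses : List (Int × Int)) (R : Int × Int → Prop)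
    (hR : ∀ u v, R u → v ∈ poses → pvAdj u v → R v) :
    ∀ reached : List (Int × Int), (∀ x ∈ reached, R x) →
      ∀ x ∈ satLoop poses reached, R x := by
  intro reached
  induction reached using satLoop.induct poses with
  | case1 r hflag ih =>
    simp only [List.foldl_attach] at ih
    intro h x hx
    rw [satLoop, dif_pos hflag] at hx
    exact ih (satFold_sound poses R hR poses (fun y hy => hy) (r, false) h) x hx
  | case2 r hflag =>
    intro h x hx
    rw [satLoop, dif_neg hflag] at hx
    exact satFold_sound poses R hR poses (fun y hy => hy) (r, false) h x hx

theorem satLoop_closed (poses : List (Int × Int)) :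
    ∀ reached : List (Int × Int), ∀ u ∈ satLoop poses reached, ∀ v, v ∈ poses →
      pvAdj u v → v ∈ satLoop poses reached := by
  intro reached
  induction reached using satLoop.induct poses with
  | case1 r hflag ih =>
    simp only [List.foldl_attach] at ih
    intro u hu v hv hadj
    rw [satLoop, dif_pos hflag] at hu ⊢
    exact ih u hu v hv hadj
  | case2 r hflag =>
    intro u hu v hv hadj
    rw [satLoop, dif_neg hflag] at hu ⊢
    have hfalse : (poses.foldl satStep (r, false)).2 = false := by
      simpa using hflag
    obtain ⟨h1, h2⟩ := satFold_fix poses r hfalse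
    rw [h1] at hu ⊢
    by_contra hvr
    have hcond := h2 v hv hvr
    apply hcond
    have hsymm := pvAdj_symm hadj
    rcases hsymm with h | h | h | h <;> rw [← h]
    · exact Or.inl hu
    · exact Or.inr (Or.inl hu)
    · exact Or.inr (Or.inr (Or.inl hu))
    · exact Or.inr (Or.inr (Or.inr hu))

theorem satLoop_complete (poses : List (Int × Int)) (start : Int × Int) (x : Int × Int)
    (h : pvReach poses start x) : x ∈ satLoop poses [start] := by
  induction h with
  | base => exact satLoop_mono poses [start] start (List.mem_singleton_self _)
  | step _ hv hadj ih => exact satLoop_closed poses [start] _ ih _ hv hadj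

theorem is_contiguous_eq (poses : List (Int × Int)) :
    is_contiguous poses = is_contiguous_alt poses := by
  cases poses with
  | nil => rfl
  | cons p0 rest =>
    have hmem : ∀ y : Int × Int,
        y ∈ (PySem.Set.ofList (p0 :: rest) : List (Int × Int)) ↔ y ∈ p0 :: rest :=
      fun y => PySem.Set.mem_ofList _ y
    have hA : ∀ x, x ∈ isContigBFS (PySem.Set.ofList (p0 :: rest)) [p0] [p0] ↔
        pvReach (p0 :: rest) p0 x := by
      intro x
      constructor
      · intro hx
        refine bfs_sound _ (pvReach (p0 :: rest) p0)
          (fun u v hu hv hadj => pvReach.step hu ((hmem v).mp hv) hadj)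
          [p0] [p0] ?_ ?_ x hx
        · intro s hs; simp only [List.mem_singleton] at hs; subst hs; exact pvReach.base
        · intro s hs; simp only [List.mem_singleton] at hs; subst hs; exact pvReach.base
      · intro hx
        exact bfs_complete _ p0 x (pvReach_congr (fun y => (hmem y).symm) hx)
    have hB : ∀ x, x ∈ satLoop (p0 :: rest) [p0] ↔ pvReach (p0 :: rest) p0 x := by
      intro x
      constructor
      · intro hx
        refine satLoop_sound _ (pvReach (p0 :: rest) p0)
          (fun u v hu hv hadj => pvReach.step hu hv hadj) [p0] ?_ x hx
        intro s hs; simp only [List.mem_singleton] at hs; subst hs; exact pvReach.base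
      · exact satLoop_complete _ p0 x
    have hperm : (isContigBFS (PySem.Set.ofList (p0 :: rest)) [p0] [p0]).Perm
        (satLoop (p0 :: rest) [p0]) := by
      refine (List.perm_ext_iff_of_nodup ?_ ?_).mpr (fun x => (hA x).trans (hB x).symm)
      · exact bfs_nodup _ [p0] [p0] (List.nodup_singleton _)
      · exact satLoop_nodup _ [p0] (List.nodup_singleton _)
    simp only [is_contiguous, is_contiguous_alt, hperm.length_eq]

-- ===== VERDICT (by name: the statement is the Claim_ definition above) =====
theorem is_contiguous_spec : Claim_equal_is_contiguous := by
  intro poses _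
  unfold Spec_is_contiguous
  exact is_contiguous_eq poses
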